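-- pv_equiv track=rewrite | github.com/HomuraT/LLM4VKG | src/utils/tools.py | modify_sets_to_connect
-- ===== SOURCE A (Python) =====
-- def find(parent, x):
--     if parent[x] != x:
--         parent[x] = find(parent, parent[x])
--     return parent[x]
--
-- def union(parent, rank, x, y):
--     rootX = find(parent, x)
--     rootY = find(parent, y)
--     if rootX != rootY:
--         if rank[rootX] > rank[rootY]:
--             parent[rootX] = rootY
--         elif rank[rootX] < rank[rootY]:
--             parent[rootY] = rootX
--         else:
--             parent[rootY] = rootX
--             rank[rootX] += 1
--
-- def modify_sets_to_connect(sets):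
--     parent = {}
--     rank = {}
--
--     # 初始化每个元素的父节点和秩(rank)
--     for s in sets:
--         for item in s:
--             if item not in parent:
--                 parent[item] = item
--                 rank[item] = 0
--
--     # 合并集合中的元素
--     for s in sets:
--         first_item = s[0]
--         for item in s[1:]:
--             union(parent, rank, first_item, item)
--
--     # 找到所有集合的根节点
--     roots = set(find(parent, item) for item in parent)
--     root_list = sorted(list(roots))  # 按元素大小排序根节点
--
--     # 修改集合中的元素以连接所有集合
--     for i in range(1, len(root_list)):
--         root = root_list[i]
--         for s in sets:
--             if find(parent, s[0]) == root:
--                 smallest_root = root_list[0]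
--                 s[0] = smallest_root
--                 for item in s[1:]:
--                     union(parent, rank, s[0], item)
--                 break
--
--     return sets
-- ===== SOURCE B (Python) =====
-- # B: same union-find build, but the connection phase is a single pass that
-- # indexes the first set of each component by its root, then rewrites directly
-- # (A rescans the whole sets list once per root).
-- # Note: like A, this mutates the inner lists of `sets` in place.
--
-- def find(parent, x):
--     if parent[x] != x:
--         parent[x] = find(parent, parent[x])
--     return parent[x]
--
-- def union(parent, rank, x, y):
--     rootX = find(parent, x)
--     rootY = find(parent, y)
--     if rootX != rootY:
--         if rank[rootX] > rank[rootY]: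
--             parent[rootX] = rootY
--         elif rank[rootX] < rank[rootY]:
--             parent[rootY] = rootX
--         else:
--             parent[rootY] = rootX
--             rank[rootX] += 1
--
-- def modify_sets_to_connect(sets):
--     parent = {}
--     rank = {}
--     for s in sets:
--         for item in s:
--             if item not in parent:
--                 parent[item] = item
--                 rank[item] = 0
--     for s in sets:
--         first_item = s[0]
--         for item in s[1:]:
--             union(parent, rank, first_item, item)
--     # one pass: first set index per component root
--     firsts = {}
--     for i, s in enumerate(sets):
--         root = find(parent, s[0])
--         if root not in firsts:
--             firsts[root] = i
--     if firsts:
--         smallest = min(firsts)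
--         for root, i in firsts.items():
--             if root != smallest:
--                 sets[i][0] = smallest
--     return sets
-- ===== Notes on version B (the rewrite author's own statement) =====
-- stated objective: alternative
-- what changed: A's connection phase rescans the whole sets list once per root (per component) with repeated find calls; B makes a single enumerate pass that indexes the first set of each component root in a dict, takes min(firsts) once, and rewrites those heads directly.
import Mathlib
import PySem

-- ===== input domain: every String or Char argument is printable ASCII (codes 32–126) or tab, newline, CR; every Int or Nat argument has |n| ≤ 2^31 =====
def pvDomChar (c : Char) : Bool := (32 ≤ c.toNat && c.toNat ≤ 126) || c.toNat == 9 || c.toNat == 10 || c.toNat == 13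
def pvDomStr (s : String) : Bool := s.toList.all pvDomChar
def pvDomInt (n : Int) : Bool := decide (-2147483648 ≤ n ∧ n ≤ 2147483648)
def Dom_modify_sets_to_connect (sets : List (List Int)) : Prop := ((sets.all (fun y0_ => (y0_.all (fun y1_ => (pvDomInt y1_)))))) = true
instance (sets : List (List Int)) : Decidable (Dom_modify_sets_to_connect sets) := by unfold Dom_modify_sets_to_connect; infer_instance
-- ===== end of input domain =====

-- B replaces A's per-root rescan of all sets by one pass that indexes the first
-- set of each component root, then rewrites those heads directly (both versions
-- mutate the input's inner lists in Python; the equivalence is about the return value).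

-- ===== PORT A =====
-- find(parent, x) with path compression; `fuel` only makes the recursion
-- structural (call sites pass size+1, enough for the acyclic parents that occur;
-- parent[x] is ported as getD x x: x is always a key where A calls find).
def ufFind (fuel : Nat) (p : PySem.Dict Int Int) (x : Int) : Int × PySem.Dict Int Int :=
  match fuel with
  | 0 => (x, p)
  | f+1 =>
    let px := p.getD x x
    if px = x then (x, p)
    else
      let r := ufFind f p px
      (r.1, r.2.insert x r.1)

-- union(parent, rank, x, y); rank[root] is ported as getD root 0 (roots are always rank keys here)
def ufUnion (parent rank : PySem.Dict Int Int) (x y : Int) :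
    PySem.Dict Int Int × PySem.Dict Int Int :=
  let fx := ufFind (parent.size + 1) parent x
  let fy := ufFind (fx.2.size + 1) fx.2 y
  if fx.1 ≠ fy.1 then
    if rank.getD fx.1 0 > rank.getD fy.1 0 then (fy.2.insert fx.1 fy.1, rank)
    else if rank.getD fx.1 0 < rank.getD fy.1 0 then (fy.2.insert fy.1 fx.1, rank)
    else (fy.2.insert fy.1 fx.1, rank.insert fx.1 (rank.getD fx.1 0 + 1))
  else (fy.2, rank)

-- the two initial loops of modify_sets_to_connect (identical lines in A and B)
def ufInit (sets : List (List Int)) : PySem.Dict Int Int × PySem.Dict Int Int :=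
  sets.foldl
    (fun pr s => s.foldl
      (fun pr item =>
        if pr.1.contains item then pr else (pr.1.insert item item, pr.2.insert item 0)) pr)
    (PySem.Dict.empty, PySem.Dict.empty)

def ufMerge (sets : List (List Int)) (pr : PySem.Dict Int Int × PySem.Dict Int Int) :
    PySem.Dict Int Int × PySem.Dict Int Int :=
  sets.foldl
    (fun pr s =>
      let first := PySem.List.pyGetD s 0 0    -- s[0]; empty s (IndexError) is outside Pre_
      (PySem.List.slice s (some 1) none).foldl
        (fun pr item => ufUnion pr.1 pr.2 first item) pr)
    pr

-- A's inner `for s in sets: if find(parent, s[0]) == root: … break`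
def scanA (root r0 : Int) (parent rank : PySem.Dict Int Int) :
    List (List Int) → PySem.Dict Int Int × PySem.Dict Int Int × List (List Int)
  | [] => (parent, rank, [])
  | s :: rest =>
    let f := ufFind (parent.size + 1) parent (PySem.List.pyGetD s 0 0)
    if f.1 = root then
      let s' := PySem.List.pySetD s 0 r0
      let pr := (PySem.List.slice s' (some 1) none).foldl
          (fun pr item => ufUnion pr.1 pr.2 r0 item) (f.2, rank)
      (pr.1, pr.2, s' :: rest)
    else
      let res := scanA root r0 f.2 rank rest
      (res.1, res.2.1, s :: res.2.2)

def modify_sets_to_connect (sets : List (List Int)) : List (List Int) :=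
  let pr1 := ufMerge sets (ufInit sets)
  let rootsAcc := pr1.1.keys.foldl
      (fun (acc : PySem.Set Int × PySem.Dict Int Int) item =>
        let f := ufFind (acc.2.size + 1) acc.2 item
        (PySem.Set.add acc.1 f.1, f.2))
      (PySem.Set.empty, pr1.1)
  let root_list := PySem.List.sorted rootsAcc.1 (fun x => x) false
  let res := (PySem.List.pyRange 1 (root_list.length : Int) 1).foldl
      (fun (st : PySem.Dict Int Int × PySem.Dict Int Int × List (List Int)) i =>
        let root := PySem.List.pyGetD root_list i 0
        scanA root (PySem.List.pyGetD root_list 0 0) st.1 st.2.1 st.2.2)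
      (rootsAcc.2, pr1.2, sets)
  res.2.2

-- ===== PORT B =====
def modify_sets_to_connect_alt (sets : List (List Int)) : List (List Int) :=
  let pr1 := ufMerge sets (ufInit sets)
  let fb := (PySem.List.enumerate sets 0).foldl
      (fun (acc : PySem.Dict Int Int × PySem.Dict Int Int) is =>
        let f := ufFind (acc.2.size + 1) acc.2 (PySem.List.pyGetD is.2 0 0)
        (if acc.1.contains f.1 then acc.1 else acc.1.insert f.1 is.1, f.2))
      (PySem.Dict.empty, pr1.1)
  let firsts := fb.1
  if firsts.items = [] then sets
  else
    let smallest := (PySem.List.min? firsts.keys (fun x => x)).getD 0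
    firsts.items.foldl
      (fun cur ri =>
        if ri.1 ≠ smallest then
          PySem.List.pySetD cur ri.2 (PySem.List.pySetD (PySem.List.pyGetD cur ri.2 []) 0 smallest)
        else cur)
      sets

-- ===== PRECONDITION & SPEC =====
-- Pre_ excludes exactly the inputs containing an empty inner list, on which A raises IndexError at s[0].
def Pre_modify_sets_to_connect (sets : List (List Int)) : Prop := ∀ s ∈ sets, s ≠ []
instance (sets : List (List Int)) : Decidable (Pre_modify_sets_to_connect sets) := by
  unfold Pre_modify_sets_to_connect; infer_instance

def pvWitness_modify_sets_to_connect : List (List Int) := [[1, 5], [2], [3, 2]]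

def Spec_modify_sets_to_connect (sets : List (List Int)) (out : List (List Int)) : Prop :=
  out = modify_sets_to_connect_alt sets
instance (sets : List (List Int)) (out : List (List Int)) :
    Decidable (Spec_modify_sets_to_connect sets out) := by
  unfold Spec_modify_sets_to_connect; infer_instance

-- ===== CLAIM (what is proved, stated in full; the proofs are below) =====
def Claim_equal_modify_sets_to_connect : Prop :=
  ∀ (sets : List (List Int)), Dom_modify_sets_to_connect sets →
    Pre_modify_sets_to_connect sets →
    Spec_modify_sets_to_connect sets (modify_sets_to_connect sets)

-- ===== LEMMAS AND PROOFS =====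

-- step function of the parent dict
def pstep (p : PySem.Dict Int Int) (x : Int) : Int := p.getD x x
def piter (p : PySem.Dict Int Int) (k : Nat) (x : Int) : Int := (pstep p)^[k] x
-- x's parent chain reaches the fixpoint z
def PReach (p : PySem.Dict Int Int) (x z : Int) : Prop :=
  (∃ k, piter p k x = z) ∧ pstep p z = z
-- well-formed union-find parent: keys closed under step, every chain stabilizes
def PInv (p : PySem.Dict Int Int) : Prop :=
  (∀ x ∈ p.keys, pstep p x ∈ p.keys) ∧ (∀ x, ∃ z, PReach p x z)
-- two parents with the same reachability semantics
def PEq (p q : PySem.Dict Int Int) : Prop := ∀ y w, PReach p y w ↔ PReach q y w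

theorem piter_zero (p : PySem.Dict Int Int) (x : Int) : piter p 0 x = x := rfl
theorem piter_succ (p : PySem.Dict Int Int) (k : Nat) (x : Int) :
    piter p (k+1) x = piter p k (pstep p x) := Function.iterate_succ_apply (pstep p) k x
theorem piter_succ' (p : PySem.Dict Int Int) (k : Nat) (x : Int) :
    piter p (k+1) x = pstep p (piter p k x) := Function.iterate_succ_apply' (pstep p) k x
theorem piter_add (p : PySem.Dict Int Int) (j k : Nat) (x : Int) :
    piter p (j + k) x = piter p j (piter p k x) := by
  simp [piter, Function.iterate_add_apply]

theorem piter_fix {p : PySem.Dict Int Int} {z : Int} (h : pstep p z = z) (k : Nat) :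
    piter p k z = z := by
  induction k with
  | zero => rfl
  | succ n ih => rw [piter_succ', ih, h]

theorem preach_fix {p : PySem.Dict Int Int} {z : Int} (h : pstep p z = z) : PReach p z z :=
  ⟨⟨0, rfl⟩, h⟩

theorem preach_unique {p : PySem.Dict Int Int} {x z1 z2 : Int}
    (h1 : PReach p x z1) (h2 : PReach p x z2) : z1 = z2 := by
  obtain ⟨⟨k1, hk1⟩, hf1⟩ := h1
  obtain ⟨⟨k2, hk2⟩, hf2⟩ := h2
  rcases le_total k1 k2 with h | h
  · have : piter p k2 x = z1 := by
      have := piter_add p (k2 - k1) k1 x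
      rw [Nat.sub_add_cancel h] at this
      rw [this, hk1, piter_fix hf1]
    rw [hk2] at this; exact this.symm
  · have : piter p k1 x = z2 := by
      have := piter_add p (k1 - k2) k2 x
      rw [Nat.sub_add_cancel h] at this
      rw [this, hk2, piter_fix hf2]
    rw [hk1] at this; exact this

theorem preach_step {p : PySem.Dict Int Int} {x z : Int} (h : PReach p x z) :
    PReach p (pstep p x) z := by
  obtain ⟨⟨k, hk⟩, hf⟩ := h
  cases k with
  | zero =>
    simp only [piter_zero] at hk; subst hk
    exact ⟨⟨0, by simpa [piter_zero] using hf⟩, hf⟩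
  | succ n => exact ⟨⟨n, by rw [← piter_succ]; exact hk⟩, hf⟩

-- if the chain from y passes through x, then x reaches y's root
theorem preach_shift {p : PySem.Dict Int Int} {x y z : Int} {k : Nat}
    (hk : piter p k y = x) (h : PReach p y z) : PReach p x z := by
  obtain ⟨⟨m, hm⟩, hf⟩ := h
  rcases le_total k m with hle | hle
  · refine ⟨⟨m - k, ?_⟩, hf⟩
    have := piter_add p (m - k) k y
    rw [Nat.sub_add_cancel hle] at this
    rw [hk] at this; rw [← this, hm]
  · have : piter p k y = z := by
      have := piter_add p (k - m) m y
      rw [Nat.sub_add_cancel hle] at this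
      rw [this, hm, piter_fix hf]
    rw [hk] at this; subst this; exact ⟨⟨0, rfl⟩, hf⟩

theorem pstep_of_not_mem {p : PySem.Dict Int Int} {x : Int} (h : x ∉ p.keys) :
    pstep p x = x := by
  have hc : p.contains x = false := by
    by_contra hc
    exact h ((PySem.Dict.contains_iff_mem_keys p x).mp (by simpa using Bool.of_not_eq_false hc))
  simp [pstep, PySem.Dict.getD_of_not_contains p x hc]

theorem preach_not_mem {p : PySem.Dict Int Int} {x : Int} (h : x ∉ p.keys) :
    PReach p x x := preach_fix (pstep_of_not_mem h)

theorem piter_mem {p : PySem.Dict Int Int} (hC : ∀ x ∈ p.keys, pstep p x ∈ p.keys)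
    {x : Int} (hx : x ∈ p.keys) (k : Nat) : piter p k x ∈ p.keys := by
  induction k with
  | zero => exact hx
  | succ n ih => rw [piter_succ']; exact hC _ ih

theorem preach_mem {p : PySem.Dict Int Int} (hC : ∀ x ∈ p.keys, pstep p x ∈ p.keys)
    {x z : Int} (hx : x ∈ p.keys) (h : PReach p x z) : z ∈ p.keys := by
  obtain ⟨⟨k, hk⟩, _⟩ := h
  rw [← hk]; exact piter_mem hC hx k

theorem preach_bound {p : PySem.Dict Int Int} (hC : ∀ x ∈ p.keys, pstep p x ∈ p.keys)
    {x z : Int} (h : PReach p x z) : ∃ k ≤ p.keys.length, piter p k x = z := by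
  by_cases hx : x ∈ p.keys
  · have hex : ∃ k, piter p k x = z := h.1
    set m := Nat.find hex with hm
    have hmz : piter p m x = z := Nat.find_spec hex
    -- j ↦ piter p j x is injective on Fin (m+1)
    have hne12 : ∀ j1 j2 : Nat, j1 < j2 → j2 ≤ m → piter p j1 x ≠ piter p j2 x := by
      intro j1 j2 hlt hj2 he
      have hper : ∀ t, piter p (j1 + t) x = piter p (j2 + t) x := by
        intro t
        rw [Nat.add_comm j1 t, Nat.add_comm j2 t, piter_add, piter_add, he]
      have hz' : piter p (j1 + (m - j2)) x = z := by
        rw [hper, Nat.add_sub_cancel' hj2, hmz]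
      exact Nat.find_min hex (by omega) hz'
    have hinj : Function.Injective (fun j : Fin (m + 1) => piter p j.1 x) := by
      intro j1 j2 he
      simp only at he
      rcases Nat.lt_trichotomy j1.1 j2.1 with h | h | h
      · exact absurd he (hne12 j1.1 j2.1 h (by omega))
      · exact Fin.ext h
      · exact absurd he.symm (hne12 j2.1 j1.1 h (by omega))
    have hmap : ∀ j : Fin (m + 1), piter p j.1 x ∈ p.keys.toFinset := by
      intro j; simp only [List.mem_toFinset]; exact piter_mem hC hx j.1
    have hcard : m + 1 ≤ p.keys.toFinset.card := by
      have hinj2 : Function.Injective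
          (fun j : Fin (m+1) => (⟨piter p j.1 x, hmap j⟩ : {y // y ∈ p.keys.toFinset})) := by
        intro a b hab
        exact hinj (congrArg Subtype.val hab)
      have := Fintype.card_le_of_injective _ hinj2
      rwa [Fintype.card_fin, Fintype.card_coe] at this
    have : m ≤ p.keys.length := by
      have := List.toFinset_card_le p.keys
      omega
    exact ⟨m, by omega, hmz⟩
  · have hz : z = x := preach_unique h (preach_not_mem hx)
    exact ⟨0, Nat.zero_le _, hz.symm⟩

theorem pstep_insert (p : PySem.Dict Int Int) (k v y : Int) :
    pstep (p.insert k v) y = if y = k then v else pstep p y := by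
  simp [pstep, PySem.Dict.getD_insert]

theorem dict_size_keys (p : PySem.Dict Int Int) : p.size = p.keys.length := by
  simp [PySem.Dict.size, PySem.Dict.keys]

theorem peq_refl (p : PySem.Dict Int Int) : PEq p p := fun _ _ => Iff.rfl
theorem peq_trans {p q r : PySem.Dict Int Int} (h1 : PEq p q) (h2 : PEq q r) : PEq p r :=
  fun y w => (h1 y w).trans (h2 y w)

-- inserting a shortcut x ↦ z (z = x's root, z ≠ x) preserves everything
theorem insert_root {p : PySem.Dict Int Int} {x z : Int} (hI : PInv p)
    (hx : x ∈ p.keys) (hz : PReach p x z) (hne : z ≠ x) :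
    (p.insert x z).keys = p.keys ∧ PInv (p.insert x z) ∧ PEq p (p.insert x z) := by
  obtain ⟨hC, hE⟩ := hI
  set p' := p.insert x z with hp'
  have hkeys : p'.keys = p.keys := by
    apply PySem.Dict.keys_insert_of_contains
    exact (PySem.Dict.contains_iff_mem_keys p x).mpr hx
  have hzfix' : pstep p' z = z := by
    rw [pstep_insert, if_neg hne]; exact hz.2
  have hfwd : ∀ y w, PReach p y w → PReach p' y w := by
    intro y w hyw
    by_cases hhit : ∃ j, piter p j y = x
    · -- chain passes x : w = z
      have hxw : PReach p x w := preach_shift (Nat.find_spec hhit) hyw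
      have hwz : w = z := preach_unique hxw hz
      subst hwz
      set j := Nat.find hhit with hj
      have hjx : piter p j y = x := Nat.find_spec hhit
      have hpre : ∀ i ≤ j, piter p' i y = piter p i y := by
        intro i hi
        induction i with
        | zero => rfl
        | succ n ih =>
          rw [piter_succ', piter_succ', ih (by omega)]
          rw [pstep_insert]
          rw [if_neg (Nat.find_min hhit (by omega : n < j))]
      refine ⟨⟨j + 1, ?_⟩, hzfix'⟩
      rw [piter_succ', hpre j le_rfl, hjx, pstep_insert, if_pos rfl]
    · push_neg at hhit
      have hall : ∀ i, piter p' i y = piter p i y := by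
        intro i
        induction i with
        | zero => rfl
        | succ n ih => rw [piter_succ', piter_succ', ih, pstep_insert, if_neg (hhit n)]
      obtain ⟨⟨k, hk⟩, hf⟩ := hyw
      have hwx : w ≠ x := by
        intro he; exact hhit k (by rw [hk, he])
      exact ⟨⟨k, by rw [hall, hk]⟩, by rw [pstep_insert, if_neg hwx, hf]⟩
  have hE' : ∀ y, ∃ w, PReach p' y w := fun y => (hE y).imp (fun w => hfwd y w)
  refine ⟨hkeys, ⟨?_, hE'⟩, ?_⟩
  · -- closed
    intro y hy
    rw [hkeys] at hy ⊢
    by_cases hyx : y = x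
    · subst hyx
      rw [pstep_insert, if_pos rfl]
      exact preach_mem hC hx hz
    · rw [pstep_insert, if_neg hyx]; exact hC y hy
  · intro y w
    constructor
    · exact hfwd y w
    · intro hw'
      obtain ⟨w0, hw0⟩ := hE y
      have := hfwd y w0 hw0
      rw [preach_unique hw' this]
      exact hw0

-- linking root ry under root rx (both fixed, distinct): roots {ry} are redirected to rx
theorem link_root {p : PySem.Dict Int Int} {rx ry : Int} (hI : PInv p)
    (hrx : rx ∈ p.keys) (hry : ry ∈ p.keys)
    (hfx : pstep p rx = rx) (hfy : pstep p ry = ry) (hne : ry ≠ rx) :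
    (p.insert ry rx).keys = p.keys ∧ PInv (p.insert ry rx) ∧
      (∀ y w, PReach p y w → PReach (p.insert ry rx) y (if w = ry then rx else w)) := by
  obtain ⟨hC, hE⟩ := hI
  set p' := p.insert ry rx with hp'
  have hkeys : p'.keys = p.keys := by
    apply PySem.Dict.keys_insert_of_contains
    exact (PySem.Dict.contains_iff_mem_keys p ry).mpr hry
  have hfx' : pstep p' rx = rx := by rw [pstep_insert, if_neg (fun h => hne h.symm), hfx]
  have hfwd : ∀ y w, PReach p y w → PReach p' y (if w = ry then rx else w) := by
    intro y w hyw
    by_cases hw : w = ry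
    · subst hw
      rw [if_pos rfl]
      obtain ⟨⟨k, hk⟩, hf⟩ := hyw
      have hhit : ∃ j, piter p j y = w := ⟨k, hk⟩
      set j := Nat.find hhit with hj
      have hjx : piter p j y = w := Nat.find_spec hhit
      have hpre : ∀ i ≤ j, piter p' i y = piter p i y := by
        intro i hi
        induction i with
        | zero => rfl
        | succ n ih =>
          rw [piter_succ', piter_succ', ih (by omega), pstep_insert,
            if_neg (Nat.find_min hhit (by omega : n < j))]
      refine ⟨⟨j + 1, ?_⟩, hfx'⟩
      rw [piter_succ', hpre j le_rfl, hjx, pstep_insert, if_pos rfl]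
    · rw [if_neg hw]
      obtain ⟨⟨k, hk⟩, hf⟩ := hyw
      have hhit : ∀ j, piter p j y ≠ ry := by
        intro j he
        have h1 : PReach p ry w := preach_shift he ⟨⟨k, hk⟩, hf⟩
        exact hw (preach_unique h1 (preach_fix hfy))
      have hall : ∀ i, piter p' i y = piter p i y := by
        intro i
        induction i with
        | zero => rfl
        | succ n ih => rw [piter_succ', piter_succ', ih, pstep_insert, if_neg (hhit n)]
      exact ⟨⟨k, by rw [hall, hk]⟩, by rw [pstep_insert, if_neg hw, hf]⟩
  refine ⟨hkeys, ⟨?_, ?_⟩, hfwd⟩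
  · intro y hy
    rw [hkeys] at hy ⊢
    by_cases hyr : y = ry
    · subst hyr; rw [pstep_insert, if_pos rfl]; exact hrx
    · rw [pstep_insert, if_neg hyr]; exact hC y hy
  · intro y
    obtain ⟨w, hw⟩ := hE y
    exact ⟨_, hfwd y w hw⟩

theorem ufFind_spec {p : PySem.Dict Int Int} (hI : PInv p) :
    ∀ (fuel : Nat) (x z : Int), PReach p x z → (∃ k, k < fuel ∧ piter p k x = z) →
    (ufFind fuel p x).1 = z ∧ (ufFind fuel p x).2.keys = p.keys ∧
      PInv (ufFind fuel p x).2 ∧ PEq p (ufFind fuel p x).2 := by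
  intro fuel
  induction fuel with
  | zero =>
    intro x z _ hf
    obtain ⟨k, hk, _⟩ := hf
    omega
  | succ f ih =>
    intro x z hz hf
    by_cases hpx : p.getD x x = x
    · have hzx : z = x := by
        obtain ⟨k, _, hk⟩ := hf
        rw [piter_fix (show pstep p x = x from hpx) k] at hk
        exact hk.symm
      subst hzx
      simp only [ufFind, hpx, if_pos rfl]
      exact ⟨rfl, rfl, hI, peq_refl p⟩
    · have hne : z ≠ x := fun he => hpx (by rw [← he] at hpx ⊢; exact he ▸ hz.2)
      have hz2 : PReach p (pstep p x) z := preach_step hz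
      have hf2 : ∃ k, k < f ∧ piter p k (pstep p x) = z := by
        obtain ⟨k, hkf, hk⟩ := hf
        cases k with
        | zero => exact absurd hk.symm hne
        | succ n => exact ⟨n, by omega, by rw [← piter_succ]; exact hk⟩
      obtain ⟨h1, h2, h3, h4⟩ := ih (pstep p x) z hz2 hf2
      have hxmem : x ∈ p.keys := by
        by_contra h
        exact hpx (pstep_of_not_mem h)
      have hxm1 : x ∈ (ufFind f p (pstep p x)).2.keys := h2 ▸ hxmem
      have hrz : PReach (ufFind f p (pstep p x)).2 x z := (h4 x z).mp hz
      obtain ⟨hk1, hk2, hk3⟩ := insert_root h3 hxm1 hrz hne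
      have hred : ufFind (f+1) p x =
          ((ufFind f p (pstep p x)).1,
            (ufFind f p (pstep p x)).2.insert x (ufFind f p (pstep p x)).1) := by
        simp only [ufFind, hpx, if_neg hpx]
        rfl
      rw [hred, h1]
      exact ⟨rfl, by rw [hk1, h2], hk2, peq_trans h4 hk3⟩

theorem ufFind_run {p : PySem.Dict Int Int} {x z : Int} (hI : PInv p) (hz : PReach p x z) :
    (ufFind (p.size+1) p x).1 = z ∧ (ufFind (p.size+1) p x).2.keys = p.keys ∧
      PInv (ufFind (p.size+1) p x).2 ∧ PEq p (ufFind (p.size+1) p x).2 := by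
  apply ufFind_spec hI _ x z hz
  obtain ⟨k, hk, hkz⟩ := preach_bound hI.1 hz
  exact ⟨k, by rw [dict_size_keys]; omega, hkz⟩

theorem ufUnion_spec {p rk : PySem.Dict Int Int} {x y zx zy : Int} (hI : PInv p)
    (hx : x ∈ p.keys) (hy : y ∈ p.keys) (hzx : PReach p x zx) (hzy : PReach p y zy) :
    (ufUnion p rk x y).1.keys = p.keys ∧ PInv (ufUnion p rk x y).1 ∧
    ∃ w, (w = zx ∨ w = zy) ∧
      ∀ a b, PReach p a b → PReach (ufUnion p rk x y).1 a (if b = zx ∨ b = zy then w else b) := by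
  obtain ⟨e1, k1, I1, E1⟩ := ufFind_run hI hzx
  have hzy2 : PReach (ufFind (p.size+1) p x).2 y zy := (E1 y zy).mp hzy
  obtain ⟨e2, k2, I2, E2⟩ := ufFind_run I1 hzy2
  set f1 := ufFind (p.size+1) p x with hf1
  set f2 := ufFind (f1.2.size+1) f1.2 y with hf2
  have Epf2 : PEq p f2.2 := peq_trans E1 E2
  have hkeys2 : f2.2.keys = p.keys := by rw [k2, k1]
  have hzxfix : pstep f2.2 zx = zx :=
    ((Epf2 zx zx).mp (preach_fix hzx.2)).2
  have hzyfix : pstep f2.2 zy = zy :=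
    ((Epf2 zy zy).mp (preach_fix hzy.2)).2
  have hzxmem : zx ∈ f2.2.keys := by rw [hkeys2]; exact preach_mem hI.1 hx hzx
  have hzymem : zy ∈ f2.2.keys := by rw [hkeys2]; exact preach_mem hI.1 hy hzy
  have hred : ufUnion p rk x y =
      (if f1.1 ≠ f2.1 then
        if rk.getD f1.1 0 > rk.getD f2.1 0 then (f2.2.insert f1.1 f2.1, rk)
        else if rk.getD f1.1 0 < rk.getD f2.1 0 then (f2.2.insert f2.1 f1.1, rk)
        else (f2.2.insert f2.1 f1.1, rk.insert f1.1 (rk.getD f1.1 0 + 1))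
      else (f2.2, rk)) := rfl
  rw [hred, e1, e2]
  by_cases hne : zx ≠ zy
  · rw [if_pos hne]
    by_cases hb1 : rk.getD zx 0 > rk.getD zy 0
    · rw [if_pos hb1]
      obtain ⟨L1, L2, L3⟩ := link_root I2 hzymem hzxmem hzyfix hzxfix (fun h => hne h)
      refine ⟨by rw [L1, hkeys2], L2, zy, Or.inr rfl, ?_⟩
      intro a b hab
      have := L3 a b ((Epf2 a b).mp hab)
      by_cases hbx : b = zx
      · subst hbx
        rw [if_pos (Or.inl rfl)]
        rw [if_pos rfl] at this
        exact this
      · rw [if_neg hbx] at this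
        by_cases hby : b = zy
        · subst hby
          rw [if_pos (Or.inr rfl)]
          exact this
        · rw [if_neg (by tauto)]
          exact this
    · rw [if_neg hb1]
      obtain ⟨L1, L2, L3⟩ := link_root I2 hzxmem hzymem hzxfix hzyfix (Ne.symm hne)
      have hgoal : ∀ (d : PySem.Dict Int Int),
          d = f2.2.insert zy zx →
          (d.keys = p.keys ∧ PInv d ∧ ∃ w, (w = zx ∨ w = zy) ∧
            ∀ a b, PReach p a b → PReach d a (if b = zx ∨ b = zy then w else b)) := by
        intro d hd
        subst hd
        refine ⟨by rw [L1, hkeys2], L2, zx, Or.inl rfl, ?_⟩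
        intro a b hab
        have := L3 a b ((Epf2 a b).mp hab)
        by_cases hby : b = zy
        · subst hby
          rw [if_pos (Or.inr rfl)]
          rw [if_pos rfl] at this
          exact this
        · rw [if_neg hby] at this
          by_cases hbx : b = zx
          · subst hbx
            rw [if_pos (Or.inl rfl)]
            exact this
          · rw [if_neg (by tauto)]
            exact this
      by_cases hb2 : rk.getD zx 0 < rk.getD zy 0
      · rw [if_pos hb2]
        exact hgoal _ rfl
      · rw [if_neg hb2]
        exact hgoal _ rfl
  · rw [if_neg hne]
    push_neg at hne
    subst hne
    refine ⟨hkeys2, I2, zx, Or.inl rfl, ?_⟩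
    intro a b hab
    by_cases hb : b = zx
    · subst hb
      rw [if_pos (Or.inl rfl)]
      exact (Epf2 a b).mp hab
    · rw [if_neg (by tauto)]
      exact (Epf2 a b).mp hab

def rootD (p : PySem.Dict Int Int) (x : Int) : Int := piter p p.keys.length x

theorem rootD_reach {p : PySem.Dict Int Int} (hI : PInv p) (x : Int) :
    PReach p x (rootD p x) := by
  obtain ⟨z, hz⟩ := hI.2 x
  obtain ⟨k, hk, hkz⟩ := preach_bound hI.1 hz
  have hlen : piter p p.keys.length x = z := by
    have h2 := piter_add p (p.keys.length - k) k x
    rw [Nat.sub_add_cancel hk] at h2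
    rw [h2, hkz, piter_fix hz.2]
  rw [rootD, hlen]
  exact hz

theorem preach_iff_rootD {p : PySem.Dict Int Int} (hI : PInv p) (x z : Int) :
    PReach p x z ↔ z = rootD p x :=
  ⟨fun h => preach_unique h (rootD_reach hI x), fun he => he ▸ rootD_reach hI x⟩

theorem rootD_fix {p : PySem.Dict Int Int} (hI : PInv p) (x : Int) :
    pstep p (rootD p x) = rootD p x := (rootD_reach hI x).2

theorem rootD_idem {p : PySem.Dict Int Int} (hI : PInv p) (x : Int) :
    rootD p (rootD p x) = rootD p x :=
  ((preach_iff_rootD hI _ _).mp (preach_fix (rootD_fix hI x))).symm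

theorem rootD_mem {p : PySem.Dict Int Int} (hI : PInv p) {x : Int} (hx : x ∈ p.keys) :
    rootD p x ∈ p.keys := preach_mem hI.1 hx (rootD_reach hI x)

def SameR (p : PySem.Dict Int Int) (a b : Int) : Prop :=
  ∃ z, PReach p a z ∧ PReach p b z

theorem sameR_rootD {p : PySem.Dict Int Int} (hI : PInv p) {a b : Int} (h : SameR p a b) :
    rootD p a = rootD p b := by
  obtain ⟨z, ha, hb⟩ := h
  rw [← (preach_iff_rootD hI a z).mp ha, ← (preach_iff_rootD hI b z).mp hb]

-- ===== ufInit =====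

theorem ufInit_inner_getD (s : List Int) :
    ∀ (pr : PySem.Dict Int Int × PySem.Dict Int Int),
    (∀ x, pr.1.getD x x = x) →
    ∀ x, ((s.foldl (fun pr item =>
        if pr.1.contains item then pr else (pr.1.insert item item, pr.2.insert item 0)) pr)).1.getD x x = x := by
  induction s with
  | nil => intro pr h x; exact h x
  | cons a t ih =>
    intro pr h x
    simp only [List.foldl_cons]
    apply ih
    intro y
    by_cases hc : pr.1.contains a = true
    · rw [if_pos hc]; exact h y
    · rw [if_neg hc]
      show (pr.1.insert a a).getD y y = y
      rw [PySem.Dict.getD_insert]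
      split_ifs with hy
      · exact hy.symm
      · exact h y

theorem ufInit_fold_getD :
    ∀ (ls : List (List Int)) (pr : PySem.Dict Int Int × PySem.Dict Int Int),
    (∀ x, pr.1.getD x x = x) →
    ∀ x, ((ls.foldl (fun pr s => s.foldl (fun pr item =>
        if pr.1.contains item then pr else (pr.1.insert item item, pr.2.insert item 0)) pr) pr)).1.getD x x = x := by
  intro ls
  induction ls with
  | nil => intro pr h x; exact h x
  | cons s rest ih =>
    intro pr h x
    simp only [List.foldl_cons]
    exact ih _ (ufInit_inner_getD s pr h) x

theorem ufInit_getD (sets : List (List Int)) : ∀ x, (ufInit sets).1.getD x x = x := by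
  apply ufInit_fold_getD
  intro x
  simp [PySem.Dict.getD_empty]

theorem ufInit_inner_keys (s : List Int) :
    ∀ (pr : PySem.Dict Int Int × PySem.Dict Int Int) (x : Int),
    (x ∈ ((s.foldl (fun pr item =>
        if pr.1.contains item then pr else (pr.1.insert item item, pr.2.insert item 0)) pr)).1.keys
      ↔ x ∈ pr.1.keys ∨ x ∈ s) := by
  induction s with
  | nil => intro pr x; simp
  | cons a t ih =>
    intro pr x
    simp only [List.foldl_cons]
    rw [ih]
    by_cases hc : pr.1.contains a = true
    · rw [if_pos hc]
      constructor
      · rintro (h | h)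
        · exact Or.inl h
        · simp [h]
      · rintro (h | h)
        · exact Or.inl h
        · rcases List.mem_cons.mp h with h | h
          · subst h; exact Or.inl ((PySem.Dict.contains_iff_mem_keys _ _).mp hc)
          · exact Or.inr h
    · rw [if_neg hc]
      show x ∈ (pr.1.insert a a).keys ∨ x ∈ t ↔ _
      rw [PySem.Dict.mem_keys_insert]
      constructor
      · rintro ((h | h) | h)
        · simp [h]
        · exact Or.inl h
        · simp [h]
      · rintro (h | h)
        · exact Or.inl (Or.inr h)
        · rcases List.mem_cons.mp h with h | h
          · exact Or.inl (Or.inl h)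
          · exact Or.inr h

theorem ufInit_fold_keys :
    ∀ (ls : List (List Int)) (pr : PySem.Dict Int Int × PySem.Dict Int Int) (x : Int),
    (x ∈ ((ls.foldl (fun pr s => s.foldl (fun pr item =>
        if pr.1.contains item then pr else (pr.1.insert item item, pr.2.insert item 0)) pr) pr)).1.keys
      ↔ x ∈ pr.1.keys ∨ ∃ s ∈ ls, x ∈ s) := by
  intro ls
  induction ls with
  | nil => intro pr x; simp
  | cons s rest ih =>
    intro pr x
    simp only [List.foldl_cons]
    rw [ih, ufInit_inner_keys]
    simp only [List.mem_cons]
    constructor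
    · rintro ((h | h) | ⟨t, ht, hx⟩)
      · exact Or.inl h
      · exact Or.inr ⟨s, Or.inl rfl, h⟩
      · exact Or.inr ⟨t, Or.inr ht, hx⟩
    · rintro (h | ⟨t, (rfl | ht), hx⟩)
      · exact Or.inl (Or.inl h)
      · exact Or.inl (Or.inr hx)
      · exact Or.inr ⟨t, ht, hx⟩

theorem ufInit_keys (sets : List (List Int)) :
    ∀ x, x ∈ (ufInit sets).1.keys ↔ ∃ s ∈ sets, x ∈ s := by
  intro x
  have := ufInit_fold_keys sets (PySem.Dict.empty, PySem.Dict.empty) x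
  simpa [PySem.Dict.keys_empty] using this

theorem ufInit_pstep (sets : List (List Int)) : ∀ x, pstep (ufInit sets).1 x = x :=
  fun x => ufInit_getD sets x

theorem ufInit_PInv (sets : List (List Int)) : PInv (ufInit sets).1 :=
  ⟨fun x hx => by rw [ufInit_pstep]; exact hx,
   fun x => ⟨x, preach_fix (ufInit_pstep sets x)⟩⟩

theorem sameR_refl {p : PySem.Dict Int Int} (hI : PInv p) (a : Int) : SameR p a a :=
  ⟨rootD p a, rootD_reach hI a, rootD_reach hI a⟩

-- the inner union fold (shared shape of ufMerge's and scanA's union loops)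
theorem union_fold_spec (K : List Int) :
    ∀ (t : List Int) (first : Int) (p rk : PySem.Dict Int Int),
    p.keys = K → PInv p → first ∈ K → (∀ a ∈ t, a ∈ K) →
    ((t.foldl (fun pr item => ufUnion pr.1 pr.2 first item) (p, rk)).1.keys = K ∧
     PInv (t.foldl (fun pr item => ufUnion pr.1 pr.2 first item) (p, rk)).1 ∧
     (∀ a b, SameR p a b →
        SameR (t.foldl (fun pr item => ufUnion pr.1 pr.2 first item) (p, rk)).1 a b) ∧
     (∀ a ∈ t, SameR (t.foldl (fun pr item => ufUnion pr.1 pr.2 first item) (p, rk)).1 a first)) := by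
  intro t
  induction t with
  | nil =>
    intro first p rk hk hI _ _
    exact ⟨hk, hI, fun a b h => h, by simp⟩
  | cons c rest ih =>
    intro first p rk hk hI hfirst hmem
    simp only [List.foldl_cons]
    have hfm : first ∈ p.keys := hk ▸ hfirst
    have hcm : c ∈ p.keys := hk ▸ hmem c (by simp)
    obtain ⟨U1, U2, w, hw, U3⟩ :=
      ufUnion_spec (rk := rk) hI hfm hcm (rootD_reach hI first) (rootD_reach hI c)
    have hk' : (ufUnion p rk first c).1.keys = K := by rw [U1, hk]
    have hres := ih first (ufUnion p rk first c).1 (ufUnion p rk first c).2 hk' U2 hfirst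
      (fun a ha => hmem a (by simp [ha]))
    obtain ⟨R1, R2, R3, R4⟩ := hres
    refine ⟨R1, R2, ?_, ?_⟩
    · intro a b hab
      obtain ⟨z, hza, hzb⟩ := hab
      exact R3 a b ⟨_, U3 a z hza, U3 b z hzb⟩
    · intro a ha
      rcases List.mem_cons.mp ha with rfl | ha
    -- freshly unioned element
      · apply R3
        refine ⟨w, ?_, ?_⟩
        · have h1 := U3 a (rootD p a) (rootD_reach hI a)
          rw [if_pos (Or.inr rfl)] at h1
          exact h1
        · have h2 := U3 first (rootD p first) (rootD_reach hI first)
          rw [if_pos (Or.inl rfl)] at h2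
          exact h2
      · exact R4 a ha

theorem ufMerge_fold (K : List Int) :
    ∀ (l : List (List Int)) (pr : PySem.Dict Int Int × PySem.Dict Int Int),
    pr.1.keys = K → PInv pr.1 → (∀ s ∈ l, s ≠ [] ∧ ∀ a ∈ s, a ∈ K) →
    ((ufMerge l pr).1.keys = K ∧ PInv (ufMerge l pr).1 ∧
     (∀ a b, SameR pr.1 a b → SameR (ufMerge l pr).1 a b) ∧
     (∀ s ∈ l, ∀ a ∈ s, SameR (ufMerge l pr).1 a (PySem.List.pyGetD s 0 0))) := by
  intro l
  induction l with
  | nil =>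
    intro pr hk hI _
    exact ⟨hk, hI, fun a b h => h, by simp⟩
  | cons s rest ih =>
    intro pr hk hI hmem
    obtain ⟨hs, hsK⟩ := hmem s (by simp)
    have hfirstmem : PySem.List.pyGetD s 0 0 ∈ s := by
      rw [PySem.List.pyGetD_zero]
      cases s with
      | nil => exact absurd rfl hs
      | cons a t => simp [List.getD]
    have hstep : ufMerge (s :: rest) pr =
        ufMerge rest ((PySem.List.slice s (some 1) none).foldl
          (fun pr item => ufUnion pr.1 pr.2 (PySem.List.pyGetD s 0 0) item) pr) := by
      simp only [ufMerge, List.foldl_cons]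
    have htail : ∀ a ∈ PySem.List.slice s (some 1) none, a ∈ K := by
      intro a ha
      exact hsK a (PySem.List.mem_of_mem_slice s (some 1) none ha)
    obtain ⟨F1, F2, F3, F4⟩ := union_fold_spec K (PySem.List.slice s (some 1) none)
      (PySem.List.pyGetD s 0 0) pr.1 pr.2 hk hI (hsK _ hfirstmem) htail
    have hprpair : (PySem.List.slice s (some 1) none).foldl
        (fun pr item => ufUnion pr.1 pr.2 (PySem.List.pyGetD s 0 0) item) pr
        = (PySem.List.slice s (some 1) none).foldl
        (fun pr item => ufUnion pr.1 pr.2 (PySem.List.pyGetD s 0 0) item) (pr.1, pr.2) := by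
      rfl
    rw [hstep, hprpair]
    obtain ⟨G1, G2, G3, G4⟩ := ih _ F1 F2 (fun t ht => hmem t (by simp [ht]))
    refine ⟨G1, G2, fun a b hab => G3 a b (F3 a b hab), ?_⟩
    intro t ht a ha
    rcases List.mem_cons.mp ht with rfl | ht
    · -- the set s itself: head or tail
      have hslice : PySem.List.slice t (some 1) none = t.tail := PySem.List.slice_from_one t
      by_cases hat : a ∈ PySem.List.slice t (some 1) none
      · exact G3 _ _ (F4 a hat)
      · -- a must be the head
        have : a = PySem.List.pyGetD t 0 0 := by
          cases t with
          | nil => exact absurd rfl hs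
          | cons x xs =>
            rw [hslice] at hat
            rcases List.mem_cons.mp ha with rfl | h
            · rw [PySem.List.pyGetD_zero]; simp [List.getD]
            · exact absurd h hat
        rw [this]
        exact G3 _ _ (F3 _ _ (sameR_refl hI _))
    · exact G4 t ht a ha

-- ===== phase 3: notation =====
def PM (sets : List (List Int)) : PySem.Dict Int Int := (ufMerge sets (ufInit sets)).1
def Rt (sets : List (List Int)) (x : Int) : Int := rootD (PM sets) x
def HdRoot (sets : List (List Int)) (j : Nat) : Int :=
  Rt sets (PySem.List.pyGetD (sets.getD j []) 0 0)
def isFirstB (sets : List (List Int)) (j : Nat) : Bool :=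
  decide (∀ j' < j, HdRoot sets j' ≠ HdRoot sets j)
def markB (sets : List (List Int)) (done : List Int) (j : Nat) : Bool :=
  decide (HdRoot sets j ∈ done) && isFirstB sets j
def curSpec (sets : List (List Int)) (done : List Int) (r0 : Int) (j : Nat) : List Int :=
  if markB sets done j then (sets.getD j []).set 0 r0 else sets.getD j []

-- invariant on the parent dict during A's phase 3
def PClause (sets : List (List Int)) (done : List Int) (r0 : Int) (p : PySem.Dict Int Int) : Prop :=
  ∀ u ∈ (PM sets).keys,
    ((Rt sets u ∉ done ∧ Rt sets u ≠ r0) → PReach p u (Rt sets u)) ∧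
    ((Rt sets u ∈ done ∨ Rt sets u = r0) →
      ∃ M, PReach p u M ∧ (Rt sets M ∈ done ∨ Rt sets M = r0))

theorem pclause_peq {sets done r0 p q} (hE : PEq p q)
    (h : PClause sets done r0 p) : PClause sets done r0 q := by
  intro u hu
  obtain ⟨h1, h2⟩ := h u hu
  refine ⟨fun hc => (hE _ _).mp (h1 hc), fun hc => ?_⟩
  obtain ⟨M, hM1, hM2⟩ := h2 hc
  exact ⟨M, (hE _ _).mp hM1, hM2⟩

theorem rt_idem {sets : List (List Int)} (hIM : PInv (PM sets)) (u : Int) :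
    Rt sets (Rt sets u) = Rt sets u := rootD_idem hIM u

theorem pclause_weaken {sets done r0 p} (r : Int) (hIM : PInv (PM sets))
    (h : PClause sets done r0 p) : PClause sets (done ++ [r]) r0 p := by
  intro u hu
  obtain ⟨h1, h2⟩ := h u hu
  constructor
  · intro ⟨hc1, hc2⟩
    exact h1 ⟨fun hm => hc1 (by simp [hm]), hc2⟩
  · intro hc
    by_cases hold : Rt sets u ∈ done ∨ Rt sets u = r0
    · obtain ⟨M, hM1, hM2⟩ := h2 hold
      refine ⟨M, hM1, ?_⟩
      rcases hM2 with hm | hm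
      · exact Or.inl (by simp [hm])
      · exact Or.inr hm
    · -- necessarily Rt u = r
      have hur : Rt sets u = r := by
        push_neg at hold
        rcases hc with hm | hm
        · rcases List.mem_append.mp hm with hm' | hm'
          · exact absurd hm' hold.1
          · simpa using hm'
        · exact absurd hm hold.2
      push_neg at hold
      refine ⟨Rt sets u, h1 ⟨hold.1, hold.2⟩, Or.inl ?_⟩
      rw [rt_idem hIM, hur]
      simp

theorem pclause_union {sets done r0} {p rk : PySem.Dict Int Int} {x y : Int}
    (hIM : PInv (PM sets))
    (hkeys : p.keys = (PM sets).keys) (hI : PInv p) (hPC : PClause sets done r0 p)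
    (hx : x ∈ (PM sets).keys) (hy : y ∈ (PM sets).keys)
    (hxside : Rt sets x ∈ done ∨ Rt sets x = r0)
    (hyside : Rt sets y ∈ done ∨ Rt sets y = r0) :
    (ufUnion p rk x y).1.keys = (PM sets).keys ∧ PInv (ufUnion p rk x y).1 ∧
      PClause sets done r0 (ufUnion p rk x y).1 := by
  have hxm : x ∈ p.keys := hkeys ▸ hx
  have hym : y ∈ p.keys := hkeys ▸ hy
  obtain ⟨U1, U2, w, hw, U3⟩ :=
    ufUnion_spec (rk := rk) hI hxm hym (rootD_reach hI x) (rootD_reach hI y)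
  refine ⟨by rw [U1, hkeys], U2, ?_⟩
  -- Rt of the two old roots is on the processed side
  have hzx : Rt sets (rootD p x) ∈ done ∨ Rt sets (rootD p x) = r0 := by
    obtain ⟨M, hM1, hM2⟩ := (hPC x hx).2 hxside
    rwa [preach_unique hM1 (rootD_reach hI x)] at hM2
  have hzy : Rt sets (rootD p y) ∈ done ∨ Rt sets (rootD p y) = r0 := by
    obtain ⟨M, hM1, hM2⟩ := (hPC y hy).2 hyside
    rwa [preach_unique hM1 (rootD_reach hI y)] at hM2
  have hwside : Rt sets w ∈ done ∨ Rt sets w = r0 := by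
    rcases hw with rfl | rfl
    · exact hzx
    · exact hzy
  intro u hu
  obtain ⟨h1, h2⟩ := hPC u hu
  constructor
  · intro hc
    have hru := h1 hc
    have := U3 u (Rt sets u) hru
    rw [if_neg ?_] at this
    · exact this
    · rintro (he | he)
      · rw [← he, rt_idem hIM] at hzx
        rcases hzx with hm | hm
        · exact hc.1 hm
        · exact hc.2 hm
      · rw [← he, rt_idem hIM] at hzy
        rcases hzy with hm | hm
        · exact hc.1 hm
        · exact hc.2 hm
  · intro hc
    obtain ⟨M, hM1, hM2⟩ := h2 hc
    have := U3 u M hM1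
    by_cases hmb : M = rootD p x ∨ M = rootD p y
    · rw [if_pos hmb] at this
      exact ⟨w, this, hwside⟩
    · rw [if_neg hmb] at this
      exact ⟨M, this, hM2⟩

theorem pclause_union_fold {sets done r0} (hIM : PInv (PM sets)) :
    ∀ (t : List Int) (first : Int) (p rk : PySem.Dict Int Int),
    p.keys = (PM sets).keys → PInv p → PClause sets done r0 p →
    first ∈ (PM sets).keys → (Rt sets first ∈ done ∨ Rt sets first = r0) →
    (∀ a ∈ t, a ∈ (PM sets).keys ∧ (Rt sets a ∈ done ∨ Rt sets a = r0)) →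
    ((t.foldl (fun pr item => ufUnion pr.1 pr.2 first item) (p, rk)).1.keys = (PM sets).keys ∧
     PInv (t.foldl (fun pr item => ufUnion pr.1 pr.2 first item) (p, rk)).1 ∧
     PClause sets done r0 (t.foldl (fun pr item => ufUnion pr.1 pr.2 first item) (p, rk)).1) := by
  intro t
  induction t with
  | nil => intro first p rk h1 h2 h3 _ _ _; exact ⟨h1, h2, h3⟩
  | cons c rest ih =>
    intro first p rk h1 h2 h3 hf hfs hmem
    simp only [List.foldl_cons]
    obtain ⟨hcm, hcs⟩ := hmem c (by simp)
    obtain ⟨V1, V2, V3⟩ := pclause_union hIM h1 h2 h3 hf hcm hfs hcs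
    exact ih first _ _ V1 V2 V3 hf hfs (fun a ha => hmem a (by simp [ha]))

theorem hd_mem {s : List Int} (hs : s ≠ []) : PySem.List.pyGetD s 0 0 ∈ s := by
  rw [PySem.List.pyGetD_zero]
  cases s with
  | nil => exact absurd rfl hs
  | cons a t => simp [List.getD]

theorem pySetD_zero_eq {s : List Int} (v : Int) : PySem.List.pySetD s 0 v = s.set 0 v := by
  rw [PySem.List.pySetD_of_nonneg s v (by omega)]
  rfl

theorem set_zero_head {s : List Int} (hs : s ≠ []) (v : Int) :
    PySem.List.pyGetD (s.set 0 v) 0 0 = v := by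
  cases s with
  | nil => exact absurd rfl hs
  | cons a t => simp [PySem.List.pyGetD_zero, List.getD]

theorem set_zero_tail (s : List Int) (v : Int) : (s.set 0 v).tail = s.tail := by
  cases s with
  | nil => rfl
  | cons a t => rfl

theorem markB_append_of_ne {sets : List (List Int)} {done : List Int} {r : Int} {j : Nat}
    (h : HdRoot sets j ≠ r) : markB sets (done ++ [r]) j = markB sets done j := by
  simp only [markB, List.mem_append, List.mem_singleton]
  congr 1
  simp [h]

theorem curSpec_append {sets : List (List Int)} {done : List Int} {r r0 : Int} {j : Nat}
    (h : HdRoot sets j ≠ r ∨ isFirstB sets j = false) :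
    curSpec sets (done ++ [r]) r0 j = curSpec sets done r0 j := by
  rcases h with h | h
  · simp only [curSpec, markB_append_of_ne h]
  · simp only [curSpec, markB, h, Bool.and_false]

theorem scanA_spec (sets : List (List Int)) (done : List Int) (hIM : PInv (PM sets))
    (hPre : ∀ s ∈ sets, s ≠ [])
    (hconn : ∀ s ∈ sets, ∀ a ∈ s, SameR (PM sets) a (PySem.List.pyGetD s 0 0))
    (hkeysmem : ∀ s ∈ sets, ∀ a ∈ s, a ∈ (PM sets).keys)
    (r0 r : Int)
    (hr0root : Rt sets r0 = r0) (hr0mem : r0 ∈ (PM sets).keys)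
    (hrroot : Rt sets r = r) (hrdone : r ∉ done) (hrne : r ≠ r0) :
    ∀ (l : List (List Int)) (off : Nat) (p rk : PySem.Dict Int Int),
    off + l.length = sets.length →
    (∀ i, i < l.length → l.getD i [] = curSpec sets done r0 (off + i)) →
    (∀ j, j < off → HdRoot sets j ≠ r) →
    (∃ j, off ≤ j ∧ j < sets.length ∧ HdRoot sets j = r) →
    p.keys = (PM sets).keys → PInv p → PClause sets done r0 p →
    ((scanA r r0 p rk l).2.2.length = l.length ∧
     (∀ i, i < l.length →
        (scanA r r0 p rk l).2.2.getD i [] = curSpec sets (done ++ [r]) r0 (off + i)) ∧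
     (scanA r r0 p rk l).1.keys = (PM sets).keys ∧
     PInv (scanA r r0 p rk l).1 ∧
     PClause sets (done ++ [r]) r0 (scanA r r0 p rk l).1) := by
  intro l
  induction l with
  | nil =>
    intro off p rk hlen _ _ hmatch _ _ _
    obtain ⟨j, hj1, hj2, _⟩ := hmatch
    simp at hlen
    omega
  | cons c rest ih =>
    intro off p rk hlen hl h3 hmatch hk hI hPC
    have hoff : off < sets.length := by simp at hlen; omega
    have hc0 : c = curSpec sets done r0 off := by
      have := hl 0 (by simp)
      simpa using this
    have hsget : sets.getD off [] = sets[off] := List.getD_eq_getElem sets [] hoff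
    have hsmem : sets.getD off [] ∈ sets := by rw [hsget]; exact List.getElem_mem hoff
    have hsne : sets.getD off [] ≠ [] := hPre _ hsmem
    have hhdmem : PySem.List.pyGetD (sets.getD off []) 0 0 ∈ (PM sets).keys :=
      hkeysmem _ hsmem _ (hd_mem hsne)
    have hred : scanA r r0 p rk (c :: rest) =
        (if (ufFind (p.size + 1) p (PySem.List.pyGetD c 0 0)).1 = r then
          (((PySem.List.slice (PySem.List.pySetD c 0 r0) (some 1) none).foldl
              (fun pr item => ufUnion pr.1 pr.2 r0 item)
              ((ufFind (p.size + 1) p (PySem.List.pyGetD c 0 0)).2, rk)).1,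
           ((PySem.List.slice (PySem.List.pySetD c 0 r0) (some 1) none).foldl
              (fun pr item => ufUnion pr.1 pr.2 r0 item)
              ((ufFind (p.size + 1) p (PySem.List.pyGetD c 0 0)).2, rk)).2,
           PySem.List.pySetD c 0 r0 :: rest)
         else
          ((scanA r r0 (ufFind (p.size + 1) p (PySem.List.pyGetD c 0 0)).2 rk rest).1,
           (scanA r r0 (ufFind (p.size + 1) p (PySem.List.pyGetD c 0 0)).2 rk rest).2.1,
           c :: (scanA r r0 (ufFind (p.size + 1) p (PySem.List.pyGetD c 0 0)).2 rk rest).2.2)) := rfl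
    -- common continuation for the no-match case
    have hnomatch : ∀ M : Int, PReach p (PySem.List.pyGetD c 0 0) M → M ≠ r →
        HdRoot sets off ≠ r →
        ((scanA r r0 p rk (c :: rest)).2.2.length = (c :: rest).length ∧
         (∀ i, i < (c :: rest).length →
            (scanA r r0 p rk (c :: rest)).2.2.getD i [] = curSpec sets (done ++ [r]) r0 (off + i)) ∧
         (scanA r r0 p rk (c :: rest)).1.keys = (PM sets).keys ∧
         PInv (scanA r r0 p rk (c :: rest)).1 ∧
         PClause sets (done ++ [r]) r0 (scanA r r0 p rk (c :: rest)).1) := by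
      intro M hM hMner hoffne
      obtain ⟨e1, k1, I1, E1⟩ := ufFind_run hI hM
      rw [hred]
      rw [e1, if_neg hMner]
      obtain ⟨W1, W2, W3, W4, W5⟩ := ih (off + 1)
        (ufFind (p.size + 1) p (PySem.List.pyGetD c 0 0)).2 rk
        (by simp at hlen ⊢; omega)
        (fun i hi => by
          have := hl (i + 1) (by simp; omega)
          simp only [List.getD_cons_succ] at this
          rw [this]
          congr 1
          omega)
        (fun j hj => by
          rcases Nat.lt_succ_iff_lt_or_eq.mp hj with hj | rfl
          · exact h3 j hj
          · exact hoffne)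
        (by
          obtain ⟨j, hj1, hj2, hj3⟩ := hmatch
          refine ⟨j, ?_, hj2, hj3⟩
          rcases Nat.eq_or_lt_of_le hj1 with rfl | hj
          · exact absurd hj3 hoffne
          · omega)
        (by rw [k1, hk]) I1 (pclause_peq E1 hPC)
      refine ⟨by simpa using W1, ?_, W3, W4, W5⟩
      intro i hi
      cases i with
      | zero =>
        simp only [List.getD_cons_zero, Nat.add_zero]
        rw [hc0, curSpec_append (Or.inl hoffne)]
      | succ n =>
        simp only [List.getD_cons_succ]
        have := W2 n (by simpa using Nat.lt_of_succ_lt_succ hi)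
        rw [this]
        congr 1
        omega
    by_cases hmk : markB sets done off = true
    · -- marked set: its head is r0, whose current root has a processed Rt
      have hcv : c = (sets.getD off []).set 0 r0 := by rw [hc0]; simp [curSpec, hmk]
      have hhd : PySem.List.pyGetD c 0 0 = r0 := by rw [hcv]; exact set_zero_head hsne r0
      obtain ⟨M, hM, hMside⟩ := (hPC r0 hr0mem).2 (Or.inr hr0root)
      have hMner : M ≠ r := by
        intro he
        rw [he, hrroot] at hMside
        rcases hMside with h | h
        · exact hrdone h
        · exact hrne h
      have hoffne : HdRoot sets off ≠ r := by
        have hin : HdRoot sets off ∈ done := by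
          simp only [markB, Bool.and_eq_true, decide_eq_true_eq] at hmk
          exact hmk.1
        intro he
        exact hrdone (he ▸ hin)
      exact hnomatch M (hhd ▸ hM) hMner hoffne
    · -- unmarked set: its head is the original one
      have hcv : c = sets.getD off [] := by
        rw [hc0]
        simp only [curSpec]
        rw [if_neg (by simp [hmk])]
      have hhd : PySem.List.pyGetD c 0 0 = PySem.List.pyGetD (sets.getD off []) 0 0 := by
        rw [hcv]
      have hHdoff : HdRoot sets off = Rt sets (PySem.List.pyGetD c 0 0) := by
        rw [hhd]; rfl
      by_cases hside : Rt sets (PySem.List.pyGetD c 0 0) ∈ done ∨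
          Rt sets (PySem.List.pyGetD c 0 0) = r0
      · obtain ⟨M, hM, hMside⟩ := (hPC _ (hhd ▸ hhdmem)).2 hside
        have hMner : M ≠ r := by
          intro he
          rw [he, hrroot] at hMside
          rcases hMside with h | h
          · exact hrdone h
          · exact hrne h
        have hoffne : HdRoot sets off ≠ r := by
          rw [hHdoff]
          intro he
          rw [he] at hside
          rcases hside with h | h
          · exact hrdone h
          · exact hrne h
        exact hnomatch M hM hMner hoffne
      · push_neg at hside
        have hreach : PReach p (PySem.List.pyGetD c 0 0) (Rt sets (PySem.List.pyGetD c 0 0)) :=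
          (hPC _ (hhd ▸ hhdmem)).1 ⟨hside.1, hside.2⟩
        by_cases hrhd : Rt sets (PySem.List.pyGetD c 0 0) = r
        · -- MATCH: rewrite this set's head and union its tail with r0
          obtain ⟨e1, k1, I1, E1⟩ := ufFind_run hI hreach
          rw [hred]
          rw [e1, if_pos hrhd]
          have hPC1 : PClause sets (done ++ [r]) r0
              (ufFind (p.size + 1) p (PySem.List.pyGetD c 0 0)).2 :=
            pclause_weaken r hIM (pclause_peq E1 hPC)
          have hslice : PySem.List.slice (PySem.List.pySetD c 0 r0) (some 1) none
              = (sets.getD off []).tail := by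
            rw [PySem.List.slice_from_one, pySetD_zero_eq, set_zero_tail, hcv]
          have htmem : ∀ a ∈ (sets.getD off []).tail,
              a ∈ (PM sets).keys ∧ (Rt sets a ∈ done ++ [r] ∨ Rt sets a = r0) := by
            intro a ha
            have hamem : a ∈ sets.getD off [] := List.mem_of_mem_tail ha
            refine ⟨hkeysmem _ hsmem _ hamem, Or.inl ?_⟩
            have hsame : SameR (PM sets) a (PySem.List.pyGetD (sets.getD off []) 0 0) :=
              hconn _ hsmem a hamem
            have : Rt sets a = Rt sets (PySem.List.pyGetD (sets.getD off []) 0 0) :=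
              sameR_rootD hIM hsame
            rw [this, ← hhd, hrhd]
            simp
          obtain ⟨F1, F2, F3⟩ := pclause_union_fold hIM (sets.getD off []).tail r0
            (ufFind (p.size + 1) p (PySem.List.pyGetD c 0 0)).2 rk
            (by rw [k1, hk]) I1 hPC1 hr0mem (Or.inr hr0root) htmem
          rw [hslice]
          refine ⟨by simp, ?_, F1, F2, F3⟩
          intro i hi
          cases i with
          | zero =>
            simp only [List.getD_cons_zero, Nat.add_zero]
            rw [pySetD_zero_eq, hcv]
            have hmk' : markB sets (done ++ [r]) off = true := by
              simp only [markB, Bool.and_eq_true, decide_eq_true_eq]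
              constructor
              · rw [hHdoff, hrhd]; simp
              · simp only [isFirstB, decide_eq_true_eq]
                intro j' hj'
                rw [hHdoff, hrhd]
                exact h3 j' hj'
            simp [curSpec, hmk']
          | succ n =>
            simp only [List.getD_cons_succ]
            have hn : n < rest.length := by simpa using Nat.lt_of_succ_lt_succ hi
            have := hl (n + 1) (by simp; omega)
            simp only [List.getD_cons_succ] at this
            rw [this]
            rw [curSpec_append]
            by_cases hjr : HdRoot sets (off + (n + 1)) = r
            · right
              simp only [isFirstB, decide_eq_false_iff_not]
              intro hall
              have := hall off (by omega)
              rw [hjr] at this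
              exact this (by rw [hHdoff, hrhd])
            · exact Or.inl hjr
        · exact hnomatch _ hreach (by rwa [← hHdoff] at hrhd ⊢) (hHdoff ▸ hrhd)

theorem rootsFold_spec (sets : List (List Int)) (hIM : PInv (PM sets)) :
    ∀ (l : List Int) (acc : PySem.Set Int) (q : PySem.Dict Int Int),
    q.keys = (PM sets).keys → PInv q → PEq (PM sets) q →
    ((l.foldl (fun (acc : PySem.Set Int × PySem.Dict Int Int) item =>
        (PySem.Set.add acc.1 (ufFind (acc.2.size + 1) acc.2 item).1,
         (ufFind (acc.2.size + 1) acc.2 item).2)) (acc, q)).1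
        = PySem.Set.update acc (l.map (Rt sets)) ∧
     (l.foldl (fun (acc : PySem.Set Int × PySem.Dict Int Int) item =>
        (PySem.Set.add acc.1 (ufFind (acc.2.size + 1) acc.2 item).1,
         (ufFind (acc.2.size + 1) acc.2 item).2)) (acc, q)).2.keys = (PM sets).keys ∧
     PInv (l.foldl (fun (acc : PySem.Set Int × PySem.Dict Int Int) item =>
        (PySem.Set.add acc.1 (ufFind (acc.2.size + 1) acc.2 item).1,
         (ufFind (acc.2.size + 1) acc.2 item).2)) (acc, q)).2 ∧
     PEq (PM sets) (l.foldl (fun (acc : PySem.Set Int × PySem.Dict Int Int) item =>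
        (PySem.Set.add acc.1 (ufFind (acc.2.size + 1) acc.2 item).1,
         (ufFind (acc.2.size + 1) acc.2 item).2)) (acc, q)).2) := by
  intro l
  induction l with
  | nil =>
    intro acc q h1 h2 h3
    exact ⟨rfl, h1, h2, h3⟩
  | cons x t ih =>
    intro acc q h1 h2 h3
    have hz : PReach q x (Rt sets x) := (h3 x _).mp (rootD_reach hIM x)
    obtain ⟨e1, k1, I1, E1⟩ := ufFind_run h2 hz
    simp only [List.foldl_cons, List.map_cons]
    rw [e1]
    have := ih (PySem.Set.add acc (Rt sets x)) _ (by rw [k1, h1]) I1 (peq_trans h3 E1)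
    obtain ⟨H1, H2, H3, H4⟩ := this
    refine ⟨?_, H2, H3, H4⟩
    rw [H1]
    rfl

-- one step of A's outer loop, iterated over the remaining sorted roots
theorem mainLoop_spec (sets : List (List Int)) (hIM : PInv (PM sets))
    (hPre : ∀ s ∈ sets, s ≠ [])
    (hconn : ∀ s ∈ sets, ∀ a ∈ s, SameR (PM sets) a (PySem.List.pyGetD s 0 0))
    (hkeysmem : ∀ s ∈ sets, ∀ a ∈ s, a ∈ (PM sets).keys)
    (r0 : Int) (hr0root : Rt sets r0 = r0) (hr0mem : r0 ∈ (PM sets).keys) :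
    ∀ (rs : List Int) (done : List Int) (st : PySem.Dict Int Int × PySem.Dict Int Int × List (List Int)),
    (∀ r ∈ rs, Rt sets r = r ∧ (∃ j, j < sets.length ∧ HdRoot sets j = r) ∧ r ≠ r0) →
    rs.Nodup → (∀ r ∈ rs, r ∉ done) →
    st.2.2.length = sets.length →
    (∀ i, i < sets.length → st.2.2.getD i [] = curSpec sets done r0 i) →
    st.1.keys = (PM sets).keys → PInv st.1 → PClause sets done r0 st.1 →
    (((rs.foldl (fun st r => scanA r r0 st.1 st.2.1 st.2.2) st)).2.2.length = sets.length ∧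
     (∀ i, i < sets.length →
        (rs.foldl (fun st r => scanA r r0 st.1 st.2.1 st.2.2) st).2.2.getD i []
          = curSpec sets (done ++ rs) r0 i) ∧
     (rs.foldl (fun st r => scanA r r0 st.1 st.2.1 st.2.2) st).1.keys = (PM sets).keys ∧
     PInv (rs.foldl (fun st r => scanA r r0 st.1 st.2.1 st.2.2) st).1 ∧
     PClause sets (done ++ rs) r0 (rs.foldl (fun st r => scanA r r0 st.1 st.2.1 st.2.2) st).1) := by
  intro rs
  induction rs with
  | nil =>
    intro done st _ _ _ s1 s2 s3 s4 s5
    simpa using ⟨s1, s2, s3, s4, s5⟩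
  | cons r rs' ih =>
    intro done st hroots hnodup hdisj s1 s2 s3 s4 s5
    obtain ⟨hrroot, hrex, hrne⟩ := hroots r (by simp)
    have hrdone : r ∉ done := hdisj r (by simp)
    obtain ⟨S1, S2, S3, S4, S5⟩ := scanA_spec sets done hIM hPre hconn hkeysmem r0 r
      hr0root hr0mem hrroot hrdone hrne st.2.2 0 st.1 st.2.1
      (by simpa using s1)
      (fun i hi => by simpa using s2 i (by omega))
      (by omega)
      (by obtain ⟨j, hj1, hj2⟩ := hrex; exact ⟨j, by omega, hj1, hj2⟩)
      s3 s4 s5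
    simp only [List.foldl_cons]
    have hres := ih (done ++ [r])
      (scanA r r0 st.1 st.2.1 st.2.2)
      (fun r' hr' => hroots r' (by simp [hr']))
      hnodup.of_cons
      (fun r' hr' => by
        intro hmem
        rcases List.mem_append.mp hmem with h | h
        · exact hdisj r' (by simp [hr']) h
        · have : r' = r := by simpa using h
          subst this
          exact (List.nodup_cons.mp hnodup).1 hr')
      (by rw [S1, s1])
      (fun i hi => by
        have := S2 i (by omega)
        simpa using this)
      S3 S4 S5
    obtain ⟨T1, T2, T3, T4, T5⟩ := hres
    refine ⟨T1, ?_, T3, T4, ?_⟩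
    · intro i hi
      rw [T2 i hi]
      congr 1
      simp
    · have : done ++ r :: rs' = (done ++ [r]) ++ rs' := by simp
      rw [this]
      exact T5

def RLs (sets : List (List Int)) : List Int :=
  PySem.List.sorted (PySem.Set.ofList ((PM sets).keys.map (Rt sets))) (fun x => x) false

theorem mem_RLs (sets : List (List Int)) (r : Int) :
    r ∈ RLs sets ↔ ∃ u ∈ (PM sets).keys, Rt sets u = r := by
  rw [RLs, PySem.List.mem_sorted, PySem.Set.mem_ofList, List.mem_map]

theorem RLs_pairwise (sets : List (List Int)) : (RLs sets).Pairwise (· < ·) :=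
  PySem.List.sorted_ofList_pairwise_lt _

theorem base_facts (sets : List (List Int)) (hPre : ∀ s ∈ sets, s ≠ []) :
    PInv (PM sets) ∧
    (∀ s ∈ sets, ∀ a ∈ s, SameR (PM sets) a (PySem.List.pyGetD s 0 0)) ∧
    (∀ s ∈ sets, ∀ a ∈ s, a ∈ (PM sets).keys) ∧
    (∀ u ∈ (PM sets).keys, ∃ s ∈ sets, u ∈ s) := by
  have hkey0 : ∀ x, x ∈ (ufInit sets).1.keys ↔ ∃ s ∈ sets, x ∈ s := ufInit_keys sets
  obtain ⟨F1, F2, F3, F4⟩ := ufMerge_fold ((ufInit sets).1.keys) sets (ufInit sets)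
    rfl (ufInit_PInv sets)
    (fun s hs => ⟨hPre s hs, fun a ha => (hkey0 a).mpr ⟨s, hs, ha⟩⟩)
  refine ⟨F2, F4, ?_, ?_⟩
  · intro s hs a ha
    show a ∈ (PM sets).keys
    rw [show (PM sets).keys = (ufInit sets).1.keys from F1]
    exact (hkey0 a).mpr ⟨s, hs, ha⟩
  · intro u hu
    rw [show (PM sets).keys = (ufInit sets).1.keys from F1] at hu
    exact (hkey0 u).mp hu

theorem hdroot_mem_RLs (sets : List (List Int)) (hPre : ∀ s ∈ sets, s ≠ [])
    {j : Nat} (hj : j < sets.length) : HdRoot sets j ∈ RLs sets := by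
  obtain ⟨hIM, hconn, hkeysmem, hback⟩ := base_facts sets hPre
  rw [mem_RLs]
  have hsget : sets.getD j [] = sets[j] := List.getD_eq_getElem sets [] hj
  have hsmem : sets.getD j [] ∈ sets := by rw [hsget]; exact List.getElem_mem hj
  refine ⟨PySem.List.pyGetD (sets.getD j []) 0 0,
    hkeysmem _ hsmem _ (hd_mem (hPre _ hsmem)), rfl⟩

theorem exists_hdroot (sets : List (List Int)) (hPre : ∀ s ∈ sets, s ≠ [])
    {r : Int} (hr : r ∈ RLs sets) : ∃ j, j < sets.length ∧ HdRoot sets j = r := by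
  obtain ⟨hIM, hconn, hkeysmem, hback⟩ := base_facts sets hPre
  obtain ⟨u, hu, hru⟩ := (mem_RLs sets r).mp hr
  obtain ⟨s, hs, hus⟩ := hback u hu
  obtain ⟨j, hj, hjs⟩ := List.mem_iff_getElem.mp hs
  refine ⟨j, hj, ?_⟩
  have hsget : sets.getD j [] = s := by rw [List.getD_eq_getElem sets [] hj, hjs]
  show Rt sets (PySem.List.pyGetD (sets.getD j []) 0 0) = r
  rw [hsget]
  have h1 : SameR (PM sets) u (PySem.List.pyGetD s 0 0) := hconn s hs u hus
  show rootD (PM sets) (PySem.List.pyGetD s 0 0) = r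
  rw [← sameR_rootD hIM h1]
  exact hru

theorem root_self (sets : List (List Int)) (hPre : ∀ s ∈ sets, s ≠ [])
    {r : Int} (hr : r ∈ RLs sets) : Rt sets r = r ∧ r ∈ (PM sets).keys := by
  obtain ⟨hIM, _, _, _⟩ := base_facts sets hPre
  obtain ⟨u, hu, hru⟩ := (mem_RLs sets r).mp hr
  exact ⟨by rw [← hru, rt_idem hIM], by rw [← hru]; exact rootD_mem hIM hu⟩

theorem curSpec_nil (sets : List (List Int)) (r0 : Int) (j : Nat) :
    curSpec sets [] r0 j = sets.getD j [] := by
  simp [curSpec, markB]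

theorem pclause_nil {sets r0 q} (hIM : PInv (PM sets)) (hq : PEq (PM sets) q)
    (hr0root : Rt sets r0 = r0) : PClause sets [] r0 q := by
  intro u hu
  constructor
  · intro _
    exact (hq u _).mp (rootD_reach hIM u)
  · intro hc
    refine ⟨Rt sets u, (hq u _).mp (rootD_reach hIM u), ?_⟩
    rcases hc with hc | hc
    · simp at hc
    · exact Or.inr (by rw [rt_idem hIM, hc])

theorem portA_desc (sets : List (List Int)) (hPre : ∀ s ∈ sets, s ≠ [])
    (r0 : Int) (rl : List Int) (hRL : RLs sets = r0 :: rl) :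
    (modify_sets_to_connect sets).length = sets.length ∧
    ∀ i, i < sets.length →
      (modify_sets_to_connect sets).getD i [] = curSpec sets rl r0 i := by
  obtain ⟨hIM, hconn, hkeysmem, hback⟩ := base_facts sets hPre
  obtain ⟨A1, A2, A3, A4⟩ := rootsFold_spec sets hIM (PM sets).keys PySem.Set.empty (PM sets)
    rfl hIM (peq_refl _)
  have hsetof : PySem.Set.update (PySem.Set.empty : PySem.Set Int)
      ((PM sets).keys.map (Rt sets)) = PySem.Set.ofList ((PM sets).keys.map (Rt sets)) := by
    rw [PySem.Set.ofList_eq_foldl]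
    rfl
  have hr0RL : r0 ∈ RLs sets := by rw [hRL]; simp
  obtain ⟨hr0root, hr0mem⟩ := root_self sets hPre hr0RL
  have hpw := RLs_pairwise sets
  rw [hRL] at hpw
  have hr0lt : ∀ r ∈ rl, r0 < r := (List.pairwise_cons.mp hpw).1
  have hrlnodup : rl.Nodup := (List.pairwise_cons.mp hpw).2.nodup
  -- reduce the port body
  simp only [modify_sets_to_connect]
  simp only [show (ufMerge sets (ufInit sets)).1 = PM sets from rfl]
  rw [A1, hsetof]
  rw [show PySem.List.sorted (PySem.Set.ofList ((PM sets).keys.map (Rt sets)))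
      (fun x => x) false = RLs sets from rfl]
  rw [hRL]
  rw [show (((r0 :: rl).length : Nat) : Int) = PySem.List.len (r0 :: rl) from
    (PySem.List.len_eq _).symm]
  rw [PySem.List.foldl_pyRange_pyGetD (r0 :: rl) 0
    (fun st root => scanA root (PySem.List.pyGetD (r0 :: rl) 0 0) st.1 st.2.1 st.2.2)
    _ (by omega : (0:Int) ≤ 1)]
  simp only [PySem.List.pyGetD_zero, List.getD_cons_zero, Int.toNat_one, List.drop_succ_cons,
    List.drop_zero]
  -- main loop
  obtain ⟨T1, T2, T3, T4, T5⟩ := mainLoop_spec sets hIM hPre hconn hkeysmem r0 hr0root hr0mem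
    rl []
    (((PM sets).keys.foldl (fun (acc : PySem.Set Int × PySem.Dict Int Int) item =>
        (PySem.Set.add acc.1 (ufFind (acc.2.size + 1) acc.2 item).1,
         (ufFind (acc.2.size + 1) acc.2 item).2)) (PySem.Set.empty, PM sets)).2,
      (ufMerge sets (ufInit sets)).2, sets)
    (fun r hr => by
      have hrRL : r ∈ RLs sets := by rw [hRL]; simp [hr]
      obtain ⟨h1, h2⟩ := root_self sets hPre hrRL
      exact ⟨h1, exists_hdroot sets hPre hrRL, fun he => absurd (he ▸ hr0lt r hr) (lt_irrefl r0)⟩)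
    hrlnodup
    (fun r _ => List.not_mem_nil)
    rfl
    (fun i hi => (curSpec_nil sets r0 i).symm)
    A2 A3 (pclause_nil hIM A4 hr0root)
  simpa using ⟨T1, T2⟩

-- ===== port B side =====
def Fpre (sets : List (List Int)) (n : Nat) : List (Int × Int) :=
  ((List.range n).filter (fun j => isFirstB sets j)).map (fun j => (HdRoot sets j, (j : Int)))

theorem Fpre_succ (sets : List (List Int)) (n : Nat) :
    Fpre sets (n + 1) = Fpre sets n ++
      (if isFirstB sets n then [(HdRoot sets n, (n : Int))] else []) := by
  simp only [Fpre, List.range_succ, List.filter_append, List.map_append]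
  congr 1
  by_cases h : isFirstB sets n
  · simp [h]
  · simp [h]

theorem mem_fst_Fpre (sets : List (List Int)) (n : Nat) (k : Int) :
    k ∈ (Fpre sets n).map Prod.fst ↔ ∃ j, j < n ∧ HdRoot sets j = k := by
  simp only [Fpre, List.map_map, List.mem_map, List.mem_filter, List.mem_range]
  constructor
  · rintro ⟨j, ⟨hj, _⟩, rfl⟩
    exact ⟨j, hj, rfl⟩
  · rintro ⟨j, hj, hk⟩
    have hex : ∃ j', HdRoot sets j' = k := ⟨j, hk⟩
    refine ⟨Nat.find hex, ⟨?_, ?_⟩, ?_⟩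
    · have := Nat.find_min' hex hk
      omega
    · simp only [isFirstB, decide_eq_true_eq]
      intro j' hj' he
      exact Nat.find_min hex hj' (by rw [he, Nat.find_spec hex])
    · exact Nat.find_spec hex

theorem firstsFold_spec (sets : List (List Int)) (hIM : PInv (PM sets)) :
    ∀ (l : List (List Int)) (n : Nat) (acc q : PySem.Dict Int Int),
    n + l.length = sets.length →
    (∀ i, i < l.length → l.getD i [] = sets.getD (n + i) []) →
    q.keys = (PM sets).keys → PInv q → PEq (PM sets) q →
    acc.items = Fpre sets n →
    (∀ k, k ∈ acc.keys ↔ ∃ j, j < n ∧ HdRoot sets j = k) →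
    ((PySem.List.enumerate l (n : Int)).foldl
       (fun (acc : PySem.Dict Int Int × PySem.Dict Int Int) is =>
         (if acc.1.contains (ufFind (acc.2.size + 1) acc.2 (PySem.List.pyGetD is.2 0 0)).1
          then acc.1
          else acc.1.insert (ufFind (acc.2.size + 1) acc.2 (PySem.List.pyGetD is.2 0 0)).1 is.1,
          (ufFind (acc.2.size + 1) acc.2 (PySem.List.pyGetD is.2 0 0)).2)) (acc, q)).1.items
      = Fpre sets (n + l.length) := by
  intro l
  induction l with
  | nil =>
    intro n acc q _ _ _ _ _ hitems _
    simpa using hitems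
  | cons c rest ih =>
    intro n acc q hlen hl hk hI hE hitems hkeysiff
    rw [PySem.List.enumerate_cons, List.foldl_cons]
    have hc : c = sets.getD n [] := by
      have := hl 0 (by simp)
      simpa using this
    have hz : PReach q (PySem.List.pyGetD c 0 0)
        (Rt sets (PySem.List.pyGetD c 0 0)) :=
      (hE _ _).mp (rootD_reach hIM _)
    obtain ⟨e1, k1, I1, E1⟩ := ufFind_run hI hz
    have hHd : Rt sets (PySem.List.pyGetD c 0 0) = HdRoot sets n := by
      rw [hc]; rfl
    rw [e1, hHd]
    have hcast : (n : Int) + 1 = ((n + 1 : Nat) : Int) := by push_cast; ring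
    rw [hcast]
    by_cases hcont : acc.contains (HdRoot sets n) = true
    · rw [if_pos hcont]
      have hnf : isFirstB sets n = false := by
        obtain ⟨j, hj, hje⟩ := (hkeysiff _).mp ((PySem.Dict.contains_iff_mem_keys _ _).mp hcont)
        simp only [isFirstB, decide_eq_false_iff_not]
        intro hall
        exact hall j hj hje
      have := ih (n + 1) acc _ (by simp at hlen ⊢; omega)
        (fun i hi => by
          have := hl (i + 1) (by simp; omega)
          simp only [List.getD_cons_succ] at this
          rw [this]; congr 1; omega)
        (by rw [k1, hk]) I1 (peq_trans hE E1)
        (by rw [hitems, Fpre_succ, hnf]; simp)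
        (fun k => by
          rw [hkeysiff k]
          constructor
          · rintro ⟨j, hj, hje⟩; exact ⟨j, by omega, hje⟩
          · rintro ⟨j, hj, hje⟩
            rcases Nat.lt_succ_iff_lt_or_eq.mp hj with hj | rfl
            · exact ⟨j, hj, hje⟩
            · obtain ⟨j', hj', hje'⟩ := (hkeysiff _).mp
                ((PySem.Dict.contains_iff_mem_keys _ _).mp hcont)
              exact ⟨j', hj', by rw [hje', hje]⟩)
      rw [this]
      congr 1
      simp at hlen ⊢
      omega
    · rw [if_neg hcont]
      have hcf : acc.contains (HdRoot sets n) = false := by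
        revert hcont; cases acc.contains (HdRoot sets n) <;> simp
      have hft : isFirstB sets n = true := by
        simp only [isFirstB, decide_eq_true_eq]
        intro j hj he
        exact hcont ((PySem.Dict.contains_iff_mem_keys _ _).mpr
          ((hkeysiff _).mpr ⟨j, hj, he⟩))
      have := ih (n + 1) (acc.insert (HdRoot sets n) (n : Int)) _
        (by simp at hlen ⊢; omega)
        (fun i hi => by
          have := hl (i + 1) (by simp; omega)
          simp only [List.getD_cons_succ] at this
          rw [this]; congr 1; omega)
        (by rw [k1, hk]) I1 (peq_trans hE E1)
        (by
          rw [PySem.Dict.items_insert_of_not_contains acc _ hcf, hitems, Fpre_succ, hft]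
          simp)
        (fun k => by
          rw [PySem.Dict.mem_keys_insert]
          constructor
          · rintro (rfl | hm)
            · exact ⟨n, by omega, rfl⟩
            · obtain ⟨j, hj, hje⟩ := (hkeysiff k).mp hm
              exact ⟨j, by omega, hje⟩
          · rintro ⟨j, hj, hje⟩
            rcases Nat.lt_succ_iff_lt_or_eq.mp hj with hj | rfl
            · exact Or.inr ((hkeysiff k).mpr ⟨j, hj, hje⟩)
            · exact Or.inl hje.symm)
      rw [this]
      congr 1
      simp at hlen ⊢
      omega

theorem getD_set_list (l : List (List Int)) (j : Nat) (v : List Int) (hj : j < l.length)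
    (i : Nat) : (l.set j v).getD i [] = if i = j then v else l.getD i [] := by
  simp only [List.getD, List.getElem?_set]
  by_cases h : i = j
  · subst h
    simp [hj]
  · have h' : j ≠ i := fun hh => h hh.symm
    simp [h, h']

theorem setFold_spec (sets : List (List Int)) (r0 : Int) :
    ∀ (J : List Nat) (cur : List (List Int)),
    cur.length = sets.length → (∀ j ∈ J, j < sets.length) →
    ((J.foldl (fun cur j =>
        if HdRoot sets j ≠ r0 then
          PySem.List.pySetD cur ((j : Nat) : Int)
            (PySem.List.pySetD (PySem.List.pyGetD cur ((j : Nat) : Int) []) 0 r0)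
        else cur) cur).length = sets.length ∧
     ∀ i, i < sets.length →
       (J.foldl (fun cur j =>
          if HdRoot sets j ≠ r0 then
            PySem.List.pySetD cur ((j : Nat) : Int)
              (PySem.List.pySetD (PySem.List.pyGetD cur ((j : Nat) : Int) []) 0 r0)
          else cur) cur).getD i []
         = if i ∈ J ∧ HdRoot sets i ≠ r0 then (cur.getD i []).set 0 r0 else cur.getD i []) := by
  intro J
  induction J with
  | nil =>
    intro cur hlen _
    refine ⟨hlen, fun i hi => ?_⟩
    simp
  | cons j0 J' ih =>
    intro cur hlen hmem
    simp only [List.foldl_cons]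
    by_cases hc : HdRoot sets j0 ≠ r0
    · rw [if_pos hc]
      have hj0 : j0 < cur.length := by rw [hlen]; exact hmem j0 (by simp)
      have hstep : PySem.List.pySetD cur ((j0 : Nat) : Int)
          (PySem.List.pySetD (PySem.List.pyGetD cur ((j0 : Nat) : Int) []) 0 r0)
          = cur.set j0 ((cur.getD j0 []).set 0 r0) := by
        rw [PySem.List.pyGetD_natCast, pySetD_zero_eq, PySem.List.pySetD_natCast]
      rw [hstep]
      obtain ⟨W1, W2⟩ := ih (cur.set j0 ((cur.getD j0 []).set 0 r0))
        (by rw [List.length_set, hlen]) (fun j hj => hmem j (by simp [hj]))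
      refine ⟨W1, fun i hi => ?_⟩
      rw [W2 i hi, getD_set_list cur j0 _ hj0 i]
      simp only [List.mem_cons]
      by_cases hij : i = j0
      · subst hij
        simp only [if_pos rfl]
        by_cases hiJ : i ∈ J'
        · simp [hiJ, hc, List.set_set]
        · simp [hiJ, hc]
      · simp only [if_neg hij]
        by_cases hiJ : i ∈ J' <;> by_cases hr : HdRoot sets i ≠ r0 <;>
          simp [hij, hiJ, hr]
    · rw [if_neg hc]
      obtain ⟨W1, W2⟩ := ih cur hlen (fun j hj => hmem j (by simp [hj]))
      refine ⟨W1, fun i hi => ?_⟩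
      rw [W2 i hi]
      simp only [List.mem_cons]
      by_cases hij : i = j0
      · subst hij
        have hr : ¬ HdRoot sets i ≠ r0 := hc
        by_cases hiJ : i ∈ J' <;> simp [hiJ, hr]
      · by_cases hiJ : i ∈ J' <;> by_cases hr : HdRoot sets i ≠ r0 <;>
          simp [hij, hiJ, hr]

theorem hdroot_mem_rl_iff (sets : List (List Int)) (hPre : ∀ s ∈ sets, s ≠ [])
    (r0 : Int) (rl : List Int) (hRL : RLs sets = r0 :: rl) {i : Nat} (hi : i < sets.length) :
    (HdRoot sets i ∈ rl ↔ HdRoot sets i ≠ r0) := by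
  have hpw := RLs_pairwise sets
  rw [hRL] at hpw
  have hmem := hdroot_mem_RLs sets hPre hi
  rw [hRL] at hmem
  constructor
  · intro h he
    have := (List.pairwise_cons.mp hpw).1 _ h
    rw [he] at this
    exact lt_irrefl r0 this
  · intro h
    rcases List.mem_cons.mp hmem with he | hm
    · exact absurd he h
    · exact hm

theorem portB_desc (sets : List (List Int)) (hPre : ∀ s ∈ sets, s ≠ [])
    (r0 : Int) (rl : List Int) (hRL : RLs sets = r0 :: rl) :
    (modify_sets_to_connect_alt sets).length = sets.length ∧
    ∀ i, i < sets.length →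
      (modify_sets_to_connect_alt sets).getD i [] = curSpec sets rl r0 i := by
  obtain ⟨hIM, hconn, hkeysmem, hback⟩ := base_facts sets hPre
  have hr0RL : r0 ∈ RLs sets := by rw [hRL]; simp
  obtain ⟨hr0root, hr0mem⟩ := root_self sets hPre hr0RL
  have hpw := RLs_pairwise sets
  rw [hRL] at hpw
  have hr0lt : ∀ r ∈ rl, r0 < r := (List.pairwise_cons.mp hpw).1
  -- sets is nonempty
  have hlenpos : 0 < sets.length := by
    obtain ⟨u, hu, _⟩ := (mem_RLs sets r0).mp hr0RL
    obtain ⟨s, hs, _⟩ := hback u hu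
    exact List.length_pos_of_mem hs
  -- the firsts dict
  have hF := firstsFold_spec sets hIM sets 0 PySem.Dict.empty (PM sets)
    (by omega) (fun i hi => by simp) rfl hIM (peq_refl _)
    (by
      show PySem.Dict.empty.items = Fpre sets 0
      simp only [Fpre, List.range_zero, List.filter_nil, List.map_nil]
      rfl)
    (fun k => by
      constructor
      · intro h
        simp [PySem.Dict.keys_empty] at h
      · rintro ⟨j, hj, _⟩
        omega)
  simp only [Nat.cast_zero, Nat.zero_add] at hF
  -- F is nonempty
  have hf0 : isFirstB sets 0 = true := by
    simp [isFirstB]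
  have h0J : (0 : Nat) ∈ (List.range sets.length).filter (fun j => isFirstB sets j) := by
    rw [List.mem_filter, List.mem_range]
    exact ⟨hlenpos, hf0⟩
  have hFne : Fpre sets sets.length ≠ [] :=
    List.ne_nil_of_mem (List.mem_map_of_mem h0J)
  have hkeysF : ∀ (k : Int),
      (k ∈ (Fpre sets sets.length).map Prod.fst ↔ ∃ j, j < sets.length ∧ HdRoot sets j = k) :=
    fun k => mem_fst_Fpre sets sets.length k
  have hr0k : r0 ∈ (Fpre sets sets.length).map Prod.fst := by
    rw [hkeysF]
    exact exists_hdroot sets hPre hr0RL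
  have hminval : PySem.List.min? ((Fpre sets sets.length).map Prod.fst) (fun x => x)
      = some r0 := by
    cases hmin : PySem.List.min? ((Fpre sets sets.length).map Prod.fst) (fun x => x) with
    | none =>
      rw [PySem.List.min?_eq_none_iff] at hmin
      rw [hmin] at hr0k
      simp at hr0k
    | some m =>
      have hm1 : m ≤ r0 := PySem.List.min?_isMin hmin r0 hr0k
      have hm2 : r0 ≤ m := by
        obtain ⟨j, hj, hje⟩ := (hkeysF m).mp (PySem.List.min?_mem hmin)
        have hmm := hdroot_mem_RLs sets hPre hj
        rw [hRL, hje] at hmm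
        rcases List.mem_cons.mp hmm with he | hmm
        · omega
        · exact le_of_lt (hr0lt m hmm)
      rw [le_antisymm hm1 hm2]
  have hminval2 : PySem.List.min? (List.map (fun (x : Int × Int) => x.1)
      (Fpre sets sets.length)) (fun x => x) = some r0 := hminval
  -- reduce the port body
  simp only [modify_sets_to_connect_alt]
  simp only [show (ufMerge sets (ufInit sets)).1 = PM sets from rfl]
  simp only [PySem.Dict.keys]
  simp only [hF]
  rw [if_neg hFne]
  simp only [hminval2, Option.getD_some]
  simp only [Fpre]
  rw [List.foldl_map]
  obtain ⟨W1, W2⟩ := setFold_spec sets r0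
    ((List.range sets.length).filter (fun j => isFirstB sets j)) sets rfl
    (fun j hj => by
      rw [List.mem_filter, List.mem_range] at hj
      exact hj.1)
  refine ⟨?_, ?_⟩
  · exact W1
  · intro i hi
    have hw := W2 i hi
    refine Eq.trans (show _ from hw) ?_
    have hmemJ : (i ∈ (List.range sets.length).filter (fun j => isFirstB sets j))
        ↔ isFirstB sets i = true := by
      rw [List.mem_filter, List.mem_range]
      simp [hi]
    have hrl := hdroot_mem_rl_iff sets hPre r0 rl hRL hi
    by_cases h1 : isFirstB sets i = true <;> by_cases h2 : HdRoot sets i ≠ r0 <;>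
      simp [curSpec, markB, hmemJ, hrl, h1, h2]

theorem AB_eq (sets : List (List Int)) (hPre : ∀ s ∈ sets, s ≠ []) :
    modify_sets_to_connect sets = modify_sets_to_connect_alt sets := by
  rcases sets with _ | ⟨s0, rest⟩
  · rfl
  · have hs0 : s0 ≠ [] := hPre s0 (by simp)
    obtain ⟨hIM, hconn, hkeysmem, hback⟩ := base_facts _ hPre
    have hu : PySem.List.pyGetD s0 0 0 ∈ (PM (s0 :: rest)).keys :=
      hkeysmem s0 (by simp) _ (hd_mem hs0)
    have hrm : Rt (s0 :: rest) (PySem.List.pyGetD s0 0 0) ∈ RLs (s0 :: rest) :=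
      (mem_RLs _ _).mpr ⟨_, hu, rfl⟩
    have hne : RLs (s0 :: rest) ≠ [] := List.ne_nil_of_mem hrm
    obtain ⟨r0, rl, hRL⟩ : ∃ r0 rl, RLs (s0 :: rest) = r0 :: rl := by
      cases h : RLs (s0 :: rest) with
      | nil => exact absurd h hne
      | cons a b => exact ⟨a, b, rfl⟩
    obtain ⟨A1, A2⟩ := portA_desc _ hPre r0 rl hRL
    obtain ⟨B1, B2⟩ := portB_desc _ hPre r0 rl hRL
    apply List.ext_getElem (by rw [A1, B1])
    intro i h1 h2
    have hi : i < (s0 :: rest).length := by rw [A1] at h1; exact h1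
    have hAB := (A2 i hi).trans (B2 i hi).symm
    rwa [List.getD_eq_getElem _ _ h1, List.getD_eq_getElem _ _ h2] at hAB

-- ===== VERDICT (by name: the statement is the Claim_ definition above) =====
theorem modify_sets_to_connect_spec : Claim_equal_modify_sets_to_connect := by
  intro sets _ hpre
  unfold Spec_modify_sets_to_connect
  exact AB_eq sets hpre
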